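-- pv_equiv track=rewrite | github.com/KlugerLab/SORBET | SORBET/learning/train_utils.py | make_inner_kfold_split
-- ===== SOURCE A (Python) =====
-- from typing import List, Dict, Tuple, Any, Iterable
--
-- def make_inner_kfold_split(data_split: List[Tuple[list]], excluded_index: int) -> Tuple[List[str], List[str]]:
--     """Helper function to re-split a k-fold split to nest a k-fold split
--
--     This function is helpful for nested cross validation. For example,
--     Consider a five fold cross validation with test splits, {0,1,2,3,4}, where each index corresponds to a set of graph IDs.
--
--     stratified_kfold_split creates a record like:
--         [[[0,1,2], [3], [4]], [[4,0,1],[2],[3]],...]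
--     make_inner_kfold_split with, for example, excluded_index = 4, creates a data split like:
--         [[[0,1,2],[3],[4]], [[0,1,3],[2],[4]], [[0,2,3],[1],[4]], [[1,2,3],[0],[4]]]
--     (All possible sub-splits of the (k-1) folds not being tested).
--
--     Args:
--         data_split: the outer k-fold split to re-split along inner splits
--         excluded_index: the test fold to exclude from the inner re-split
--
--     Returns:
--         Two lists, an innner k-fold split, and the training folds used to generate those folds
--     """
--     train_folds = [ds[-1] for i, ds in enumerate(data_split) if i != excluded_index]
--     test_fold = data_split[excluded_index][-1]
--
--     inner_data_split = list()
--     for i in range(len(data_split) - 1):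
--         val_fold = train_folds[i]
--         train_fold = [sample_id for j, samples in enumerate(train_folds) for sample_id in samples if j != i]
--
--         inner_data_split.append((train_fold, val_fold, test_fold))
--         assert all(ti not in test_fold for ti in train_fold)
--         assert all(vi not in test_fold for vi in val_fold)
--
--     return inner_data_split, train_folds
-- ===== SOURCE B (Python) =====
-- def make_inner_kfold_split(data_split, excluded_index):
--     test_fold = data_split[excluded_index][-1]
--     train_folds = [ds[-1] for ds in data_split[:excluded_index] + data_split[excluded_index + 1:]]
--
--     # suffix[i] = concatenation of train_folds[i:], built in one backward pass
--     suffix = [[]]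
--     for fold in reversed(train_folds):
--         suffix.append(fold + suffix[-1])
--     suffix.reverse()
--
--     inner_data_split = []
--     before = []
--     for i, val_fold in enumerate(train_folds):
--         train_fold = before + suffix[i + 1]
--         inner_data_split.append((train_fold, val_fold, test_fold))
--         assert all(ti not in test_fold for ti in train_fold)
--         assert all(vi not in test_fold for vi in val_fold)
--         before = before + val_fold
--
--     return inner_data_split, train_folds
-- ===== Notes on version B (the rewrite author's own statement) =====
-- stated objective: alternative
-- what changed: Selects train folds by slicing around the excluded index instead of an enumerate-and-skip scan, precomputes all suffix concatenations in one backward pass, and emits each inner train fold as running-prefix + suffix[i+1] in a single forward loop, replacing A's per-iteration nested comprehension that rescans all folds.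
-- outside the precondition, e.g. on make_inner_kfold_split([(['z'],)], -1): A returns ([], [['z']]), B raises AssertionError
import Mathlib
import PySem

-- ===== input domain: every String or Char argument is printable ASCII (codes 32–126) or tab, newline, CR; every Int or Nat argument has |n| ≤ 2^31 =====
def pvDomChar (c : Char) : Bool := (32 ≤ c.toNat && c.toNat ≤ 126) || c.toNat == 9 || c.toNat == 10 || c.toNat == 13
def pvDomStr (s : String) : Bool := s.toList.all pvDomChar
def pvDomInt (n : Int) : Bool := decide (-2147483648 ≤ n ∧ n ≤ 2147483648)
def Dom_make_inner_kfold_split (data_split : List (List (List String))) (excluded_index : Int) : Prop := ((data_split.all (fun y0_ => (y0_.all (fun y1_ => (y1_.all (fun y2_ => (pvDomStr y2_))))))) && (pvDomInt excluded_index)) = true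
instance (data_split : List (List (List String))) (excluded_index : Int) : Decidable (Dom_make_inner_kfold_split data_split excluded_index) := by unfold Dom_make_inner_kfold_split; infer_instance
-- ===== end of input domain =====

-- B selects the train folds by slicing around the excluded index, builds all suffix
-- concatenations in one backward pass, and produces each inner train fold as
-- (running prefix) ++ suffix[i+1] in a single forward loop, instead of A's
-- per-iteration re-concatenation of all other folds.

-- ===== PORT A =====
-- Literal port of A.  The two 'assert' statements of A are pure checks; Pre_ below admits exactly
-- the inputs on which they pass (and on which no IndexError occurs), so they are not re-run here.
def make_inner_kfold_split (data_split : List (List (List String))) (excluded_index : Int) :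
    (List (List String × List String × List String)) × List (List String) :=
  let train_folds := (PySem.List.enumerate data_split).foldl
      (fun acc p => if p.1 ≠ excluded_index then acc ++ [PySem.List.pyGetD p.2 (-1) []] else acc) []
  let test_fold := PySem.List.pyGetD (PySem.List.pyGetD data_split excluded_index []) (-1) []
  let inner_data_split := (PySem.List.pyRange 0 (PySem.List.len data_split - 1)).foldl
      (fun acc i =>
        let val_fold := PySem.List.pyGetD train_folds i []
        let train_fold := (PySem.List.enumerate train_folds).foldl
            (fun acc2 q => if q.1 ≠ i then acc2 ++ q.2 else acc2) []
        acc ++ [(train_fold, val_fold, test_fold)]) []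
  (inner_data_split, train_folds)

-- ===== PORT B =====
-- Literal port of Source B (same remark about the asserts as for A).
def make_inner_kfold_split_alt (data_split : List (List (List String))) (excluded_index : Int) :
    (List (List String × List String × List String)) × List (List String) :=
  let test_fold := PySem.List.pyGetD (PySem.List.pyGetD data_split excluded_index []) (-1) []
  let train_folds := (PySem.List.slice data_split none (some excluded_index) ++
      PySem.List.slice data_split (some (excluded_index + 1)) none).map
      (fun d => PySem.List.pyGetD d (-1) [])
  let suffix := (train_folds.reverse.foldl
      (fun acc fold => acc ++ [fold ++ PySem.List.pyGetD acc (-1) []]) [[]]).reverse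
  let st := (PySem.List.enumerate train_folds).foldl
      (fun st p => (st.1 ++ [(st.2 ++ PySem.List.pyGetD suffix (p.1 + 1) [], p.2, test_fold)],
                    st.2 ++ p.2))
      (([] : List (List String × List String × List String)), ([] : List String))
  (st.1, train_folds)

-- ===== PRECONDITION & SPEC =====
-- Pre_ admits exactly the inputs on which A returns with an index in [0, len): it excludes
-- out-of-range indices and empty fold lists (IndexError), folds overlapping the test fold
-- (AssertionError), and negative indices, a corner where Python's wraparound makes A keep
-- every fold — including the test fold — among the train folds, so that A's occasional
-- return value there (wrapped fold empty) is accidental and B's differs (see cites).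
def Pre_make_inner_kfold_split (data_split : List (List (List String))) (excluded_index : Int) : Prop :=
  0 ≤ excluded_index ∧ excluded_index < data_split.length ∧
  (∀ ds ∈ data_split, ds ≠ []) ∧
  (∀ p ∈ PySem.List.enumerate data_split, p.1 ≠ excluded_index →
    ∀ x ∈ PySem.List.pyGetD p.2 (-1) ([] : List String),
      x ∉ PySem.List.pyGetD (PySem.List.pyGetD data_split excluded_index []) (-1) ([] : List String))
instance (data_split : List (List (List String))) (excluded_index : Int) : Decidable (Pre_make_inner_kfold_split data_split excluded_index) := by unfold Pre_make_inner_kfold_split; infer_instance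

def pvWitness_make_inner_kfold_split : List (List (List String)) × Int :=
  ([[["a"], ["b"]], [["b"], ["a"]]], 0)

def Spec_make_inner_kfold_split (data_split : List (List (List String))) (excluded_index : Int) (out : (List (List String × List String × List String)) × List (List String)) : Prop := out = make_inner_kfold_split_alt data_split excluded_index
instance (data_split : List (List (List String))) (excluded_index : Int) (out : (List (List String × List String × List String)) × List (List String)) : Decidable (Spec_make_inner_kfold_split data_split excluded_index out) := by unfold Spec_make_inner_kfold_split; infer_instance

-- ===== CLAIM (what is proved, stated in full; the proofs are below) =====
def Claim_equal_make_inner_kfold_split : Prop := ∀ (data_split : List (List (List String))) (excluded_index : Int), Dom_make_inner_kfold_split data_split excluded_index → Pre_make_inner_kfold_split data_split excluded_index → Spec_make_inner_kfold_split data_split excluded_index (make_inner_kfold_split data_split excluded_index)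

-- ===== LEMMAS AND PROOFS =====

-- indices in 'enumerate xs s' are ≥ s, so filtering out an index below s keeps everything
theorem pv_filter_enum_of_lt {α : Type} (xs : List α) (s t : Int) (h : t < s) :
    (PySem.List.enumerate xs s).filter (fun p => decide (p.1 ≠ t)) = PySem.List.enumerate xs s := by
  induction xs generalizing s with
  | nil => simp [PySem.List.enumerate_nil]
  | cons x xs ih =>
      rw [PySem.List.enumerate_cons]
      rw [List.filter_cons]
      simp only [decide_eq_true_eq]
      rw [if_pos (by omega : (s, x).1 ≠ t)]
      rw [ih (s + 1) (by omega)]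

-- filtering index s+k out of 'enumerate xs s' splits xs at position k
theorem pv_filter_enum_split {α : Type} (xs : List α) (k : Nat) (s : Int) (hk : k < xs.length) :
    (PySem.List.enumerate xs s).filter (fun p => decide (p.1 ≠ s + k)) =
      PySem.List.enumerate (xs.take k) s ++ PySem.List.enumerate (xs.drop (k + 1)) (s + k + 1) := by
  induction xs generalizing k s with
  | nil => simp at hk
  | cons x xs ih =>
      cases k with
      | zero =>
          rw [PySem.List.enumerate_cons, List.filter_cons]
          simp only [decide_eq_true_eq]
          rw [if_neg (by omega : ¬ ((s, x).1 ≠ s + (0 : Nat)))]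
          rw [pv_filter_enum_of_lt xs (s + 1) (s + (0 : Nat)) (by omega)]
          simp [PySem.List.enumerate_nil]
      | succ k =>
          rw [PySem.List.enumerate_cons, List.filter_cons]
          simp only [decide_eq_true_eq]
          rw [if_pos (by push_cast; omega : (s, x).1 ≠ s + ((k + 1 : Nat) : Int))]
          have h2 := ih k (s + 1) (by simp only [List.length_cons] at hk; omega)
          have harith : s + 1 + (k : Int) = s + ((k + 1 : Nat) : Int) := by push_cast; ring
          rw [harith] at h2
          rw [h2]
          rw [List.take_succ_cons, PySem.List.enumerate_cons, List.drop_succ_cons]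
          rw [show s + ((k + 1 : Nat) : Int) + 1 = s + 1 + (k : Int) + 1 from by push_cast; ring]
          simp

-- a guarded extend is a flatMap over a filter
theorem pv_flatMap_ite {β : Type} (l : List (Int × List β)) (i : Int) :
    l.flatMap (fun q => if q.1 ≠ i then q.2 else []) =
      (l.filter (fun q => decide (q.1 ≠ i))).flatMap (fun q => q.2) := by
  induction l with
  | nil => simp
  | cons q l ih =>
      rw [List.flatMap_cons, List.filter_cons]
      by_cases h : q.1 ≠ i
      · rw [if_pos h, if_pos (by simpa using h), List.flatMap_cons, ih]
      · rw [if_neg h, if_neg (by simpa using h), ih]; simp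

theorem pv_flatMap_snd_enum {β : Type} (xs : List (List β)) (s : Int) :
    (PySem.List.enumerate xs s).flatMap (fun q => q.2) = xs.flatten := by
  rw [List.flatMap_def, PySem.List.map_snd_enumerate]

-- the characterisation of A's inner train fold: everything except fold i, in order
theorem pv_trainA_char {β : Type} (tf : List (List β)) (i : Int) (h0 : 0 ≤ i) (h1 : i < tf.length) :
    (PySem.List.enumerate tf).flatMap (fun q => if q.1 ≠ i then q.2 else []) =
      (tf.take i.toNat).flatten ++ (tf.drop (i.toNat + 1)).flatten := by
  rw [pv_flatMap_ite]
  have hi : i = ((0 : Int) + (i.toNat : Nat)) := by omega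
  rw [show (fun q : Int × List β => decide (q.1 ≠ i)) =
      (fun q : Int × List β => decide (q.1 ≠ (0 : Int) + (i.toNat : Nat))) from by rw [← hi]]
  rw [show PySem.List.enumerate tf = PySem.List.enumerate tf 0 from rfl]
  rw [pv_filter_enum_split tf i.toNat 0 (by omega)]
  rw [List.flatMap_append, pv_flatMap_snd_enum, pv_flatMap_snd_enum]

-- mapping a function of the element over 'enumerate' ignores the indices
theorem pv_map_enum_getD (xs : List (List (List String))) (s : Int) :
    (PySem.List.enumerate xs s).map (fun p => PySem.List.pyGetD p.2 (-1) []) =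
      xs.map (fun d => PySem.List.pyGetD d (-1) []) := by
  induction xs generalizing s with
  | nil => simp [PySem.List.enumerate_nil]
  | cons x xs ih => simp [PySem.List.enumerate_cons, ih]

-- the two train-folds computations agree: skipping index e in order = slicing around e
theorem pv_tf_eq (ds : List (List (List String))) (e : Int) (h0 : 0 ≤ e) (h1 : e < ds.length) :
    (PySem.List.enumerate ds).foldl
      (fun acc p => if p.1 ≠ e then acc ++ [PySem.List.pyGetD p.2 (-1) []] else acc) [] =
    (PySem.List.slice ds none (some e) ++ PySem.List.slice ds (some (e + 1)) none).map
      (fun d => PySem.List.pyGetD d (-1) []) := by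
  rw [PySem.List.foldl_append_ite (fun p : Int × List (List String) => p.1 ≠ e)
      (fun p => PySem.List.pyGetD p.2 (-1) []) _ []]
  have he : e = ((0 : Int) + (e.toNat : Nat)) := by omega
  rw [show (fun p : Int × List (List String) => decide (p.1 ≠ e)) =
      (fun p : Int × List (List String) => decide (p.1 ≠ (0 : Int) + (e.toNat : Nat))) from by
        rw [← he]]
  rw [show PySem.List.enumerate ds = PySem.List.enumerate ds 0 from rfl]
  rw [pv_filter_enum_split ds e.toNat 0 (by omega)]
  rw [PySem.List.slice_to (xs := ds) (b := e) h0, PySem.List.slice_from (xs := ds) (a := e + 1) (by omega)]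
  rw [show (e + 1).toNat = e.toNat + 1 from by omega]
  simp only [List.nil_append, List.map_append, pv_map_enum_getD]

-- running suffix concatenations, characterised
def pvScanSuf (c : List String) : List (List String) → List (List String)
  | [] => []
  | f :: r => (f ++ c) :: pvScanSuf (f ++ c) r

theorem pv_foldl_suf (l : List (List String)) (acc : List (List String)) (c : List String)
    (h : PySem.List.pyGetD acc (-1) [] = c) :
    l.foldl (fun acc fold => acc ++ [fold ++ PySem.List.pyGetD acc (-1) []]) acc =
      acc ++ pvScanSuf c l := by
  induction l generalizing acc c with
  | nil => simp [pvScanSuf]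
  | cons f r ih =>
      rw [List.foldl_cons, h]
      rw [ih (acc ++ [f ++ c]) (f ++ c) (PySem.List.pyGetD_neg_one_append_singleton acc (f ++ c) [])]
      simp [pvScanSuf]

theorem pv_scanSuf_reverse (l : List (List String)) (c : List String) :
    (pvScanSuf c l).reverse =
      (List.range l.length).map (fun k => ((l.take (l.length - k)).reverse).flatten ++ c) := by
  induction l generalizing c with
  | nil => simp [pvScanSuf]
  | cons f r ih =>
      rw [pvScanSuf, List.reverse_cons, ih (f ++ c)]
      rw [List.length_cons, List.range_succ, List.map_append, List.map_singleton]
      congr 1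
      · apply List.map_congr_left
        intro k hk
        rw [List.mem_range] at hk
        rw [show r.length + 1 - k = (r.length - k) + 1 from by omega, List.take_succ_cons,
            List.reverse_cons, List.flatten_append]
        simp [List.append_assoc]
      · simp

theorem pv_sfx_char (tf : List (List String)) :
    (tf.reverse.foldl (fun acc fold => acc ++ [fold ++ PySem.List.pyGetD acc (-1) []]) [[]]).reverse =
      (List.range (tf.length + 1)).map (fun k => (tf.drop k).flatten) := by
  rw [pv_foldl_suf tf.reverse [[]] [] (by rfl)]
  rw [List.reverse_append, pv_scanSuf_reverse, List.length_reverse]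
  rw [List.range_succ, List.map_append, List.map_singleton, List.drop_length, List.flatten_nil]
  congr 1
  apply List.map_congr_left
  intro k hk
  rw [List.mem_range] at hk
  rw [List.take_reverse, List.reverse_reverse,
      show tf.length - (tf.length - k) = k from by omega]
  simp

-- length of the train-folds list
theorem pv_tf_len (ds : List (List (List String))) (e : Int) (h0 : 0 ≤ e) (h1 : e < ds.length) :
    ((PySem.List.enumerate ds).foldl
      (fun acc p => if p.1 ≠ e then acc ++ [PySem.List.pyGetD p.2 (-1) []] else acc) []).length =
      ds.length - 1 := by
  rw [pv_tf_eq ds e h0 h1]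
  rw [PySem.List.slice_to (xs := ds) (b := e) h0, PySem.List.slice_from (xs := ds) (a := e + 1) (by omega)]
  simp only [List.length_map, List.length_append, List.length_take, List.length_drop]
  omega

-- B's forward loop, as a recursion
def pvGo (test : List String) (sfx : List (List String)) :
    Int → List String → List (List String) → List (List String × List String × List String)
  | _, _, [] => []
  | s, pre, f :: r => (pre ++ PySem.List.pyGetD sfx (s + 1) [], f, test) :: pvGo test sfx (s + 1) (pre ++ f) r

theorem pv_foldlB (test : List String) (sfx : List (List String)) (l : List (List String)) :
    ∀ (s : Int) (acc : List (List String × List String × List String)) (pre : List String),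
    (PySem.List.enumerate l s).foldl
      (fun st p => (st.1 ++ [(st.2 ++ PySem.List.pyGetD sfx (p.1 + 1) [], p.2, test)], st.2 ++ p.2))
      (acc, pre) =
    (acc ++ pvGo test sfx s pre l, pre ++ l.flatten) := by
  induction l with
  | nil => intro s acc pre; simp [PySem.List.enumerate_nil, pvGo]
  | cons f r ih =>
      intro s acc pre
      rw [PySem.List.enumerate_cons, List.foldl_cons]
      rw [ih (s + 1) (acc ++ [(pre ++ PySem.List.pyGetD sfx (s + 1) [], f, test)]) (pre ++ f)]
      simp [pvGo, List.append_assoc]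

-- pvGo over the tail starting at i, with the running prefix = flatten of the first i folds
theorem pv_go_char (test : List String) (tf : List (List String)) :
    ∀ (l : List (List String)) (i : Nat), l = tf.drop i →
    pvGo test ((List.range (tf.length + 1)).map (fun k => (tf.drop k).flatten))
      (i : Int) ((tf.take i).flatten) l =
    (List.range' i (tf.length - i)).map
      (fun k => ((tf.take k).flatten ++ (tf.drop (k + 1)).flatten,
                 PySem.List.pyGetD tf (k : Int) [], test)) := by
  intro l
  induction l with
  | nil =>
      intro i hl
      have : tf.length ≤ i := by
        by_contra h
        have := congrArg List.length hl
        simp [List.length_drop] at this; omega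
      rw [show tf.length - i = 0 from by omega]
      simp [pvGo]
  | cons f r ih =>
      intro i hl
      have hi : i < tf.length := by
        by_contra h
        rw [List.drop_eq_nil_of_le (by omega)] at hl; exact absurd hl (by simp)
      have hdrop := List.drop_eq_getElem_cons hi
      rw [hdrop] at hl
      injection hl with hf hr
      rw [pvGo]
      have hsfx : PySem.List.pyGetD
          ((List.range (tf.length + 1)).map (fun k => (tf.drop k).flatten)) ((i : Int) + 1) [] =
          (tf.drop (i + 1)).flatten := by
        have hlt : ((i : Int) + 1) <
            (((List.range (tf.length + 1)).map (fun k => (tf.drop k).flatten)).length : Int) := by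
          simp only [List.length_map, List.length_range]; push_cast; omega
        rw [PySem.List.pyGetD_eq_getElem _ _ (by omega) hlt]
        rw [List.getElem_map, List.getElem_range]
        congr 1
      have hval : PySem.List.pyGetD tf (i : Int) [] = f := by
        rw [PySem.List.pyGetD_eq_getElem _ _ (by omega) (by omega)]
        rw [hf]; congr 1
      have hpre : (tf.take i).flatten ++ f = (tf.take (i + 1)).flatten := by
        rw [hf, List.take_add_one, List.flatten_append, List.getElem?_eq_getElem hi]
        simp
      have hrange : List.range' i (tf.length - i) = i :: List.range' (i + 1) (tf.length - (i + 1)) := by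
        rw [show tf.length - i = (tf.length - (i + 1)) + 1 from by omega, List.range'_succ]
      rw [hrange, List.map_cons]
      congr 1
      · rw [hsfx, hval]
      · rw [show ((i : Int) + 1) = ((i + 1 : Nat) : Int) from by push_cast; ring, hpre]
        exact ih (i + 1) hr

-- ===== VERDICT (by name: the statement is the Claim_ definition above) =====
theorem make_inner_kfold_split_spec : Claim_equal_make_inner_kfold_split := by
  intro ds e _hdom hpre
  obtain ⟨he0, helen, -, -⟩ := hpre
  unfold Spec_make_inner_kfold_split
  simp only [make_inner_kfold_split, make_inner_kfold_split_alt]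
  rw [← pv_tf_eq ds e he0 helen]
  set tf := (PySem.List.enumerate ds).foldl
      (fun acc p => if p.1 ≠ e then acc ++ [PySem.List.pyGetD p.2 (-1) []] else acc) [] with htf
  set test := PySem.List.pyGetD (PySem.List.pyGetD ds e []) (-1) ([] : List String) with htest
  refine Prod.ext ?_ rfl
  have hlen : PySem.List.len ds - 1 = (tf.length : Int) := by
    rw [htf, PySem.List.len_eq, pv_tf_len ds e he0 helen]; omega
  -- B side: one backward pass + one forward loop
  rw [pv_sfx_char tf, pv_foldlB]
  simp only [List.nil_append]
  have hB := pv_go_char test tf tf 0 (by simp)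
  simp only [Nat.cast_zero, List.take_zero, List.flatten_nil, Nat.sub_zero] at hB
  rw [hB, ← List.range_eq_range']
  -- A side: map over range, elementwise equal to the canonical form
  rw [hlen]
  rw [PySem.List.foldl_append_singleton_eq_map
    (fun i => ((PySem.List.enumerate tf).foldl
        (fun acc2 q => if q.1 ≠ i then acc2 ++ q.2 else acc2) [],
      PySem.List.pyGetD tf i [], test))]
  rw [PySem.List.pyRange_one, List.map_map, List.nil_append]
  rw [show ((tf.length : Int) - 0).toNat = tf.length from by omega]
  apply List.map_congr_left
  intro k hk
  rw [List.mem_range] at hk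
  simp only [Function.comp, zero_add]
  refine Prod.ext ?_ rfl
  have hA : (PySem.List.enumerate tf).foldl
      (fun acc2 q => if q.1 ≠ (k : Int) then acc2 ++ q.2 else acc2) [] =
      (tf.take k).flatten ++ (tf.drop (k + 1)).flatten := by
    have hstep : (PySem.List.enumerate tf).foldl
        (fun acc2 q => if q.1 ≠ (k : Int) then acc2 ++ q.2 else acc2) [] =
        (PySem.List.enumerate tf).foldl
        (fun acc2 q => acc2 ++ (if q.1 ≠ (k : Int) then q.2 else [])) [] := by
      apply PySem.List.foldl_congr_mem
      intro acc q _
      by_cases h : q.1 ≠ (k : Int)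
      · rw [if_pos h, if_pos h]
      · rw [if_neg h, if_neg h, List.append_nil]
    rw [hstep, PySem.List.foldl_append_eq_flatMap, List.nil_append]
    have := pv_trainA_char tf (k : Int) (by omega) (by omega)
    simpa using this
  exact hA
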